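-- pv_equiv track=rewrite | github.com/weizsw/IT1040 | StringReport/stringreport.py | alphaCheck
-- ===== SOURCE A (Python) =====
-- def alphaCheck(user_string):
--     result = 0
--     if (any(i.isalpha() for i in user_string)
--         and any(i.isspace() for i in user_string)
--         and all(i.isalpha() or i.isspace() for i in user_string)):
--         result = "yes"
--     else:
--         result = "no"
--     return result
-- ===== SOURCE B (Python) =====
-- def alphaCheck(user_string):
--     has_alpha = False
--     has_space = False
--     all_valid = True
--     for c in user_string:
--         if c.isalpha():
--             has_alpha = True
--         if c.isspace():
--             has_space = True
--         if not (c.isalpha() or c.isspace()):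
--             all_valid = False
--     return "yes" if has_alpha and has_space and all_valid else "no"
-- ===== Notes on version B (the rewrite author's own statement) =====
-- stated objective: alternative
-- what changed: A's three separate generator scans (any/any/all) over the string are replaced by one explicit loop maintaining three booleans (has_alpha, has_space, all_valid); same result, single traversal instead of three.
import Mathlib
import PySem

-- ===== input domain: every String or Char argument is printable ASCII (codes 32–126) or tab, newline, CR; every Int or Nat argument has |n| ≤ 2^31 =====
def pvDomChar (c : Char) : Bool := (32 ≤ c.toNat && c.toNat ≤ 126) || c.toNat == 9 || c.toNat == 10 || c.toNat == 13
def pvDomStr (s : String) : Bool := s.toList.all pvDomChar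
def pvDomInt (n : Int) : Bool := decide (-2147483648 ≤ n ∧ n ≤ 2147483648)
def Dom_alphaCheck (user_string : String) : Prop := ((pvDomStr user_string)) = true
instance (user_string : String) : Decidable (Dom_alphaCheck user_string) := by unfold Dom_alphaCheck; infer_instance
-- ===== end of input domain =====

-- B replaces A's three separate any/any/all scans with one explicit loop keeping three booleans (alternative decomposition, same cost).

-- ===== PORT A =====
-- A: any(isalpha) and any(isspace) and all(isalpha or isspace) → "yes" else "no"
def alphaCheck (user_string : String) : String :=
  if (user_string.toList.any (fun i => PySem.Chars.isalpha i))
      && (user_string.toList.any (fun i => PySem.Chars.isspace i))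
      && (user_string.toList.all (fun i => PySem.Chars.isalpha i || PySem.Chars.isspace i)) then
    "yes"
  else
    "no"

-- ===== PORT B =====
-- one fold over the characters maintaining (has_alpha, has_space, all_valid)
def alphaCheckStep (st : Bool × Bool × Bool) (c : Char) : Bool × Bool × Bool :=
  let st1 := if PySem.Chars.isalpha c then (true, st.2.1, st.2.2) else st
  let st2 := if PySem.Chars.isspace c then (st1.1, true, st1.2.2) else st1
  if !(PySem.Chars.isalpha c || PySem.Chars.isspace c) then (st2.1, st2.2.1, false) else st2

def alphaCheck_alt (user_string : String) : String :=
  let st := user_string.toList.foldl alphaCheckStep (false, false, true)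
  if st.1 && st.2.1 && st.2.2 then "yes" else "no"

-- ===== PRECONDITION & SPEC =====
def Spec_alphaCheck (user_string : String) (out : String) : Prop := out = alphaCheck_alt user_string
instance (user_string : String) (out : String) : Decidable (Spec_alphaCheck user_string out) := by unfold Spec_alphaCheck; infer_instance

-- ===== CLAIM (what is proved, stated in full; the proofs are below) =====
def Claim_equal_alphaCheck : Prop := ∀ (user_string : String), Dom_alphaCheck user_string → Spec_alphaCheck user_string (alphaCheck user_string)

-- ===== LEMMAS AND PROOFS =====
theorem alphaCheck_fold (l : List Char) (a s v : Bool) :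
    l.foldl alphaCheckStep (a, s, v) =
      (a || l.any (fun i => PySem.Chars.isalpha i),
       s || l.any (fun i => PySem.Chars.isspace i),
       v && l.all (fun i => PySem.Chars.isalpha i || PySem.Chars.isspace i)) := by
  induction l generalizing a s v with
  | nil => simp
  | cons c t ih =>
    simp only [List.foldl_cons, alphaCheckStep, List.any_cons, List.all_cons]
    by_cases ha : PySem.Chars.isalpha c <;> by_cases hs : PySem.Chars.isspace c <;>
      simp [ha, hs, ih]

-- ===== VERDICT (by name: the statement is the Claim_ definition above) =====
theorem alphaCheck_spec : Claim_equal_alphaCheck := by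
  intro s _
  unfold Spec_alphaCheck alphaCheck alphaCheck_alt
  rw [alphaCheck_fold]
  simp
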